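-- pv_equiv track=rewrite | github.com/noparkee/Problem-Solving | Codility/GenomicRangeQuery.py | solution
-- ===== SOURCE A (Python) =====
-- def solution(S, P, Q):
--     answer = []
--     for p, q in zip(P, Q):
--         if "A" in S[p:q+1]:
--             answer.append(1)
--         elif "C" in S[p:q+1]:
--             answer.append(2)
--         elif "G" in S[p:q+1]:
--             answer.append(3)
--         elif "T" in S[p:q+1]:
--             answer.append(4)
--
--     return answer
-- ===== SOURCE B (Python) =====
-- IMPACT = {"A": 1, "C": 2, "G": 3, "T": 4}
--
--
-- def solution(S, P, Q):
--     answer = []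
--     for p, q in zip(P, Q):
--         best = None
--         for ch in S[p:q + 1]:
--             f = IMPACT.get(ch)
--             if f is not None and (best is None or f < best):
--                 best = f
--         if best is not None:
--             answer.append(best)
--     return answer
-- ===== Notes on version B (the rewrite author's own statement) =====
-- stated objective: alternative
-- what changed: B maps each character of the query window through an impact-factor table and keeps a running minimum in a single pass, instead of A's chain of up to four separate substring-membership scans per query.
import Mathlib
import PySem

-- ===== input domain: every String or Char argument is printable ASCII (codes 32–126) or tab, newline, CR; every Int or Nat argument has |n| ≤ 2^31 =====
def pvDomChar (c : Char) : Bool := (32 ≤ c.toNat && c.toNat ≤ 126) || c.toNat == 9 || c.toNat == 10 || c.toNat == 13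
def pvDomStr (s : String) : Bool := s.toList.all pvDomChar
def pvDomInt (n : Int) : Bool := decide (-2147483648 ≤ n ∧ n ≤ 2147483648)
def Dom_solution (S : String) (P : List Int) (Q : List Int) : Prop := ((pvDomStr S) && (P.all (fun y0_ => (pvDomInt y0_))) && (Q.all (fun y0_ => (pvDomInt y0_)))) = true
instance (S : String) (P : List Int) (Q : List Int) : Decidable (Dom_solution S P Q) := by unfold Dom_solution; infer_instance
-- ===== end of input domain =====

-- B answers each query with one pass over the window, mapping characters through an
-- impact-factor table and keeping a running minimum, instead of A's chain of up to four
-- substring-membership scans. (objective: alternative)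


-- ===== PORT A =====
-- literal transliteration of A: for each (p, q), slice S[p:q+1] and test "A"/"C"/"G"/"T" membership
def solution (S : String) (P : List Int) (Q : List Int) : List Int :=
  (P.zip Q).foldl (fun answer pq =>
    if PySem.Chars.isIn ['A'] (PySem.List.slice S.toList (some pq.1) (some (pq.2 + 1))) then answer ++ [1]
    else if PySem.Chars.isIn ['C'] (PySem.List.slice S.toList (some pq.1) (some (pq.2 + 1))) then answer ++ [2]
    else if PySem.Chars.isIn ['G'] (PySem.List.slice S.toList (some pq.1) (some (pq.2 + 1))) then answer ++ [3]
    else if PySem.Chars.isIn ['T'] (PySem.List.slice S.toList (some pq.1) (some (pq.2 + 1))) then answer ++ [4]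
    else answer) []

-- ===== PORT B =====
-- the module-level IMPACT table of Source B
def IMPACT : PySem.Dict Char Int := PySem.Dict.ofList [('A', 1), ('C', 2), ('G', 3), ('T', 4)]

-- the inner loop body of Source B: f = IMPACT.get(ch); if f is not None and (best is None or f < best): best = f
def bestStep (best : Option Int) (ch : Char) : Option Int :=
  match PySem.Dict.get? IMPACT ch, best with
  | some f, none => some f
  | some f, some b => if f < b then some f else some b
  | none, _ => best

def solution_alt (S : String) (P : List Int) (Q : List Int) : List Int :=
  (P.zip Q).foldl (fun answer pq =>
    let best := (PySem.List.slice S.toList (some pq.1) (some (pq.2 + 1))).foldl bestStep none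
    match best with
    | some v => answer ++ [v]
    | none => answer) []

-- ===== PRECONDITION & SPEC =====
def Spec_solution (S : String) (P : List Int) (Q : List Int) (out : List Int) : Prop := out = solution_alt S P Q
instance (S : String) (P : List Int) (Q : List Int) (out : List Int) : Decidable (Spec_solution S P Q out) := by unfold Spec_solution; infer_instance

-- ===== CLAIM =====
def Claim_equal_solution : Prop := ∀ (S : String) (P : List Int) (Q : List Int), Dom_solution S P Q → Spec_solution S P Q (solution S P Q)

-- ===== LEMMAS AND PROOFS =====

-- the IMPACT table lookup, characterised
theorem get?_IMPACT (ch : Char) :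
    PySem.Dict.get? IMPACT ch
    = (if ch = 'A' then some 1 else if ch = 'C' then some 2
       else if ch = 'G' then some 3 else if ch = 'T' then some (4 : Int) else none) := by
  have hI : IMPACT = PySem.Dict.mk [('A', (1 : Int)), ('C', 2), ('G', 3), ('T', 4)] := by decide
  rw [hI]
  rw [PySem.Dict.get?_mk_cons, PySem.Dict.get?_mk_cons, PySem.Dict.get?_mk_cons,
      PySem.Dict.get?_mk_cons]
  by_cases h1 : ch = 'A'
  · subst h1; decide
  by_cases h2 : ch = 'C'
  · subst h2; decide
  by_cases h3 : ch = 'G'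
  · subst h3; decide
  by_cases h4 : ch = 'T'
  · subst h4; decide
  have h0 : PySem.Dict.get? (PySem.Dict.mk ([] : List (Char × Int))) ch = none := rfl
  simp [beq_iff_eq, h0, Ne.symm h1, Ne.symm h2, Ne.symm h3, Ne.symm h4, h1, h2, h3, h4]

-- option-valued minimum (none = no value yet)
def omin (a b : Option Int) : Option Int :=
  match a, b with
  | none, m => m
  | some x, none => some x
  | some x, some y => some (min x y)

theorem bestStep_eq_omin (b : Option Int) (ch : Char) :
    bestStep b ch = omin b (PySem.Dict.get? IMPACT ch) := by
  rcases hg : PySem.Dict.get? IMPACT ch with _ | f <;> rcases b with _ | x <;>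
    simp only [bestStep, omin, hg, min_def] <;>
    split_ifs <;> first | rfl | (simp only [Option.some.injEq]; omega)

theorem omin_assoc (a b c : Option Int) : omin (omin a b) c = omin a (omin b c) := by
  rcases a with _ | x <;> rcases b with _ | y <;> rcases c with _ | z <;>
    simp [omin, min_assoc]

-- the inner fold with its accumulator generalised
theorem foldl_bestStep (seg : List Char) : ∀ (b : Option Int),
    seg.foldl bestStep b = omin b (seg.foldl bestStep none) := by
  induction seg with
  | nil => intro b; rcases b with _ | x <;> rfl
  | cons ch t ih =>
    intro b
    simp only [List.foldl_cons]
    rw [ih (bestStep b ch), ih (bestStep none ch),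
        bestStep_eq_omin b ch, bestStep_eq_omin none ch,
        show omin none (PySem.Dict.get? IMPACT ch) = PySem.Dict.get? IMPACT ch from rfl]
    exact omin_assoc b (PySem.Dict.get? IMPACT ch) (t.foldl bestStep none)

-- characterisation of the inner loop: the lowest impact factor present in the window
theorem bestFold_eq (seg : List Char) :
    seg.foldl bestStep none
    = (if 'A' ∈ seg then some 1 else if 'C' ∈ seg then some 2
       else if 'G' ∈ seg then some 3 else if 'T' ∈ seg then some (4 : Int) else none) := by
  induction seg with
  | nil => rfl
  | cons ch t ih =>
    simp only [List.foldl_cons, List.mem_cons]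
    rw [foldl_bestStep t (bestStep none ch), ih, bestStep_eq_omin none ch,
        show omin none (PySem.Dict.get? IMPACT ch) = PySem.Dict.get? IMPACT ch from rfl,
        get?_IMPACT]
    by_cases h1 : ch = 'A'
    · subst h1; simp only [true_or, if_true]
      split_ifs <;> norm_num [omin]
    by_cases h2 : ch = 'C'
    · subst h2
      simp [h1, Ne.symm h1, omin]
      split_ifs <;> norm_num [omin]
    by_cases h3 : ch = 'G'
    · subst h3
      simp [h1, h2, omin]
      split_ifs <;> norm_num [omin]
    by_cases h4 : ch = 'T'
    · subst h4
      simp [h1, h2, h3, omin]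
      split_ifs <;> norm_num [omin]
    · simp only [h1, h2, h3, h4, if_false]
      simp [Ne.symm h1, Ne.symm h2, Ne.symm h3, Ne.symm h4, omin]

theorem isIn_single (c : Char) (seg : List Char) :
    PySem.Chars.isIn [c] seg = true ↔ c ∈ seg := by
  rw [PySem.Chars.isIn_iff_infix, List.singleton_infix_iff]

-- ===== VERDICT =====
theorem solution_spec : Claim_equal_solution := by
  intro S P Q _
  unfold Spec_solution solution solution_alt
  congr 1
  funext answer pq
  by_cases hA : 'A' ∈ PySem.List.slice S.toList (some pq.1) (some (pq.2 + 1)) <;>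
    by_cases hC : 'C' ∈ PySem.List.slice S.toList (some pq.1) (some (pq.2 + 1)) <;>
    by_cases hG : 'G' ∈ PySem.List.slice S.toList (some pq.1) (some (pq.2 + 1)) <;>
    by_cases hT : 'T' ∈ PySem.List.slice S.toList (some pq.1) (some (pq.2 + 1)) <;>
    simp [bestFold_eq, isIn_single, hA, hC, hG, hT]
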